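-- pv_equiv track=rewrite | github.com/IlariaCattaneo/Algorithms-Data-Structures | Vecchi esami Algo/esercizi_esame_1-8.py | shopping
-- ===== SOURCE A (Python) =====
-- def shopping(P):
--     # Con unq semplice scansione dei prezzi, per ogni nuovo prezzo p
--     # in P, controlliamo se è maggiore di quello corrente.  Nel caso,
--     # Luca compra lo smartphone, quindi aggiungiamo p alla spesa
--     # totale e impostiamo il prezzo corrente a p.
--     #
--     v = 0                       # prezzo dello smartphone corrente
--     t = 0                       # spesa totale
--     for p in P:
--         if p > v:
--             t = t + p
--             v = p
--     return t
-- ===== SOURCE B (Python) =====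
-- def shopping(P):
--     # Two separate passes: first build the table of prefix maxima
--     # (runmax[i] = max(0, P[0..i-1])), then sum the prices that beat
--     # their prefix maximum.
--     runmax = []
--     m = 0
--     for p in P:
--         runmax.append(m)
--         if p > m:
--             m = p
--     return sum(p for p, q in zip(P, runmax) if p > q)
-- ===== Notes on version B (the rewrite author's own statement) =====
-- stated objective: alternative
-- what changed: B splits the single state-carrying loop into two passes: it first materialises the prefix-maximum table, then sums the prices exceeding their prefix maximum via filter-and-sum over the zipped lists.
import Mathlib
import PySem

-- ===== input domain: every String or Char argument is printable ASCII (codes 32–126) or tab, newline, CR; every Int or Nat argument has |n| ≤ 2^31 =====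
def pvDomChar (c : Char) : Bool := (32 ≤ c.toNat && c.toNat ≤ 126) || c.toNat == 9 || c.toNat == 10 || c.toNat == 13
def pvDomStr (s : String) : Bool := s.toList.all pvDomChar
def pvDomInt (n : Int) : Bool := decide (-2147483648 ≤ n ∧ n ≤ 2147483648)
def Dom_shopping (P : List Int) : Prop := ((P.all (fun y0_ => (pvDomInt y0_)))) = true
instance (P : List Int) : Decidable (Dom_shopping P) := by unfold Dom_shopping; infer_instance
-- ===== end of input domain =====

-- B splits A's single state-carrying loop into two passes (build the prefix-maximum table, then filter-and-sum); same cost, different decomposition.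


-- ===== PORT A =====
-- the loop over P carrying state (v, t)
def shopping (P : List Int) : Int :=
  (P.foldl (fun (s : Int × Int) p => if p > s.1 then (p, s.2 + p) else s) (0, 0)).2

-- ===== PORT B =====
-- first pass: the loop appending m (the running maximum so far) before updating it
def runmaxAux (m : Int) : List Int → List Int
  | [] => []
  | p :: ps => m :: runmaxAux (if p > m then p else m) ps

-- second pass: sum(p for p, q in zip(P, runmax) if p > q)
def shopping_alt (P : List Int) : Int :=
  (((P.zip (runmaxAux 0 P)).filter (fun pq => pq.1 > pq.2)).map Prod.fst).sum

-- ===== PRECONDITION & SPEC =====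
def Spec_shopping (P : List Int) (out : Int) : Prop := out = shopping_alt P
instance (P : List Int) (out : Int) : Decidable (Spec_shopping P out) := by unfold Spec_shopping; infer_instance

-- ===== CLAIM (what is proved, stated in full; the proofs are below) =====
def Claim_equal_shopping : Prop := ∀ (P : List Int), Dom_shopping P → Spec_shopping P (shopping P)

-- ===== LEMMAS AND PROOFS =====
-- loop invariant: A's fold from any state (v, t) equals t plus B's filter-and-sum seeded with prefix max v
theorem shopping_fold_eq (P : List Int) : ∀ (v t : Int),
    (P.foldl (fun (s : Int × Int) p => if p > s.1 then (p, s.2 + p) else s) (v, t)).2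
      = t + (((P.zip (runmaxAux v P)).filter (fun pq => pq.1 > pq.2)).map Prod.fst).sum := by
  induction P with
  | nil => intro v t; simp [runmaxAux]
  | cons p ps ih =>
    intro v t
    by_cases h : p > v
    · simp [runmaxAux, h, List.foldl_cons, ih p (t + p)]
      ring
    · simp [runmaxAux, h, List.foldl_cons, ih v t]

-- ===== VERDICT (by name: the statement is the Claim_ definition above) =====
theorem shopping_spec : Claim_equal_shopping := by
  intro P _
  unfold Spec_shopping shopping shopping_alt
  simpa using shopping_fold_eq P 0 0
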